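-- pv_equiv track=rewrite | github.com/hustlekang/Prepare-CodingTest | Programmers/카카오/방금그곡.py | solution
-- ===== SOURCE A (Python) =====
-- def solution(m, musicinfos):
--     answerList=[]
--     answer='(None)'
--     order=1
--     for song in musicinfos:
--         melody = m
--         start,end,title,code = song.split(",")
--         fullcode=''
--         duration=0
--         codeLength=len(code)-code.count('#')
--         duration = (int(end[3:])+ int((int(end[:2])-int(start[:2]))*60)  ) - int(start[3:])
--
--         p=duration//codeLength
--         r=duration%codeLength
--         fullcode=code*p
--         cnt=0
--         i=0
--         while(cnt<r):
--             fullcode+=code[i]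
--             i += 1
--             if code[i]=='#':
--                 fullcode += code[i]
--                 i+=1
--             cnt+=1
--
--
--         while melody in fullcode:
--             if fullcode.index(melody) + len(melody) <= len(fullcode) - 1 and fullcode[fullcode.index(melody) + len(melody)] == '#':
--                 fullcode=fullcode[fullcode.index(melody) + len(melody):]
--             else:
--                 answerList.append((title, duration, order))
--                 break
--
--         order+=1
--
--     if answerList:
--         if len(answerList)==1:
--             answer=answerList[0][0]
--         else:
--             answerList.sort(key=lambda x:x[2])
--             answerList.sort(key=lambda x:x[1],reverse=True)
--             answer = answerList[0][0]
--
--     return answer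
-- ===== SOURCE B (Python) =====
-- def _matches(m, s):
--     # '#'-aware search: single left-to-right scan advancing a start position,
--     # instead of repeatedly re-slicing the string and calling .index twice.
--     pos = 0
--     while True:
--         i = s.find(m, pos)
--         if i == -1:
--             return False
--         j = i + len(m)
--         if j < len(s) and s[j] == '#':
--             pos = j
--         else:
--             return True
--
--
-- def _process_song(m, song):
--     # returns (title, duration) if the song's played melody contains m, else None
--     start, end, title, code = song.split(",")
--     duration = (int(end[:2]) - int(start[:2])) * 60 + int(end[3:]) - int(start[3:])
--     n_notes = len(code) - code.count('#')
--     q, r = divmod(duration, n_notes)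
--     cut = 0                      # char index after r notes (note = char + optional '#')
--     while r > 0:
--         cut += 1
--         if cut < len(code) and code[cut] == '#':
--             cut += 1
--         r -= 1
--     played = code * q + code[:cut]
--     return (title, duration) if _matches(m, played) else None
--
--
-- def solution(m, musicinfos):
--     best = None                  # ((-duration, order), title): running lexicographic minimum
--     for order, song in enumerate(musicinfos, 1):
--         td = _process_song(m, song)
--         if td is not None:
--             title, duration = td
--             key = (-duration, order)
--             if best is None or key < best[0]:
--                 best = (key, title)
--     return best[1] if best is not None else '(None)'
-- ===== Notes on version B (the rewrite author's own statement) =====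
-- stated objective: alternative
-- what changed: B replaces A's melody loop (which re-slices fullcode and calls .index twice per step) with a single find-from-position scan, replaces the char-accumulating partial-note loop by a cut index plus one slice, and replaces append-to-list + two stable sorts by a running lexicographic minimum over (-duration, order).
-- outside the precondition, e.g. on solution('', ['00:00,00:04,X,ABC']): A returns 'X', B returns 'X'
import Mathlib
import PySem

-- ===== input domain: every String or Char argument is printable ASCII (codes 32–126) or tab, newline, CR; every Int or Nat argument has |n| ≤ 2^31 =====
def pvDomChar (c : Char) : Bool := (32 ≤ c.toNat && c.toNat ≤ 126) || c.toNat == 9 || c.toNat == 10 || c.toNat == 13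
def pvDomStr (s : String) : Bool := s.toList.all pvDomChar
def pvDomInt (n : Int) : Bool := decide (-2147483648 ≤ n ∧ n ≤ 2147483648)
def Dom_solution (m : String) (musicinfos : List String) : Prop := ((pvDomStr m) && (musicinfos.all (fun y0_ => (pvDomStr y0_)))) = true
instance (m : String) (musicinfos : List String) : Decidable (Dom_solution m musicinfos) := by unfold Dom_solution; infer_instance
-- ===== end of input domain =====

-- B replaces A's repeated slice-and-re-index melody search by a single find-from-position scan,
-- the character-accumulating partial-note loop by a cut index + take, and the append-then-double-sort
-- selection by a running lexicographic minimum over (-duration, order).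


-- ===== PORT A =====

-- the `while cnt < r` loop appending note-by-note to fullcode (r = remaining count, i = char index)
def aPartial (code : List Char) : Nat → Nat → List Char → List Char
  | 0, _, acc => acc
  | r + 1, i, acc =>
    match code[i]? with
    | none => acc                     -- `fullcode += code[i]` would raise IndexError; unreachable under Pre_
    | some c =>
      match code[i + 1]? with
      | none => acc ++ [c]            -- `if code[i] == '#'` would raise IndexError; unreachable under Pre_
      | some c2 =>
        if c2 = '#' then aPartial code r (i + 2) (acc ++ [c, c2])
        else aPartial code r (i + 1) (acc ++ [c])

-- the `while melody in fullcode` loop (fuel only makes the loop total; with melody ≠ "" — Pre_ — it is never exhausted)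
def aChain (melody : List Char) : Nat → List Char → Bool
  | 0, _ => false
  | fuel + 1, fullcode =>
    if PySem.Chars.isIn melody fullcode then
      let idx := (PySem.Chars.find fullcode melody).toNat
      if (idx : Int) + melody.length ≤ (fullcode.length : Int) - 1 ∧ fullcode[idx + melody.length]? = some '#'
      then aChain melody fuel (fullcode.drop (idx + melody.length))
      else true
    else false

-- the `for song in musicinfos` loop building answerList
def aProcess (m : List Char) : List (List Char) → Int → List (List Char × Int × Int) → List (List Char × Int × Int)
  | [], _, acc => acc
  | song :: rest, order, acc =>
    match PySem.Chars.splitOn song [','] with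
    | [start, endt, title, code] =>
      match PySem.Int.ofChars? (endt.drop 3), PySem.Int.ofChars? (endt.take 2),
            PySem.Int.ofChars? (start.take 2), PySem.Int.ofChars? (start.drop 3) with
      | some e2, some e1, some s1, some s2 =>
        let codeLength : Int := (code.length : Int) - (PySem.Chars.count code ['#'] : Int)
        let duration : Int := e2 + (e1 - s1) * 60 - s2
        if codeLength = 0 then acc    -- `duration // codeLength` would raise ZeroDivisionError; unreachable under Pre_
        else
          let p := PySem.Int.floordiv duration codeLength
          let r := PySem.Int.mod duration codeLength   -- 0 ≤ r < codeLength here, so r.toNat is exact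
          let fullcode := aPartial code r.toNat 0 (PySem.List.pyRepeat code p)
          if aChain m (fullcode.length + 1) fullcode
          then aProcess m rest (order + 1) (acc ++ [(title, duration, order)])
          else aProcess m rest (order + 1) acc
      | _, _, _, _ => acc             -- int() would raise ValueError; unreachable under Pre_
    | _ => acc                        -- unpacking `start,end,title,code` would raise ValueError; unreachable under Pre_

def solution (m : String) (musicinfos : List String) : String :=
  let answerList := aProcess m.toList (musicinfos.map String.toList) 1 []
  match answerList with
  | [] => "(None)"
  | [x] => String.ofList x.1
  | _ :: _ :: _ =>
    let l1 := PySem.List.sorted answerList (fun x => x.2.2)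
    let l2 := PySem.List.sorted l1 (fun x => x.2.1) true
    match l2 with
    | y :: _ => String.ofList y.1
    | [] => "(None)"                  -- unreachable: sorting preserves nonemptiness

-- ===== PORT B =====

-- _matches: single scan with a moving start position (fuel only makes the loop total; never exhausted for m ≠ "")
def bMatches (mm s : List Char) : Nat → Nat → Bool
  | _, 0 => false
  | pos, fuel + 1 =>
    let i := PySem.Chars.findFrom s mm (pos : Int)
    if i = -1 then false
    else
      let j := i.toNat + mm.length
      if j < s.length ∧ s[j]? = some '#' then bMatches mm s j fuel
      else true

-- the `while r > 0` loop computing the char index after r notes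
def bCut (code : List Char) : Nat → Nat → Nat
  | 0, cut => cut
  | r + 1, cut =>
    if cut + 1 < code.length ∧ code[cut + 1]? = some '#' then bCut code r (cut + 2)
    else bCut code r (cut + 1)

-- _process_song
def bSong (m : List Char) (song : List Char) : Option (List Char × Int) :=
  match PySem.Chars.splitOn song [','] with
  | [start, endt, title, code] =>
    match PySem.Int.ofChars? (endt.drop 3), PySem.Int.ofChars? (endt.take 2),
          PySem.Int.ofChars? (start.take 2), PySem.Int.ofChars? (start.drop 3) with
    | some e2, some e1, some s1, some s2 =>
      let duration : Int := (e1 - s1) * 60 + e2 - s2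
      let nNotes : Int := (code.length : Int) - (PySem.Chars.count code ['#'] : Int)
      if nNotes = 0 then none         -- divmod ZeroDivisionError; unreachable under Pre_
      else
        let q := PySem.Int.floordiv duration nNotes
        let r := PySem.Int.mod duration nNotes
        let played := PySem.List.pyRepeat code q ++ code.take (bCut code r.toNat 0)
        if bMatches m played 0 (played.length + 1) then some (title, duration) else none
    | _, _, _, _ => none              -- int() ValueError; unreachable under Pre_
  | _ => none                         -- unpacking ValueError; unreachable under Pre_

def solution_alt (m : String) (musicinfos : List String) : String :=
  let best := (PySem.List.enumerate (musicinfos.map String.toList) 1).foldl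
    (fun best oc =>
      match bSong m.toList oc.2 with
      | some td =>
        let key : Int × Int := (-td.2, oc.1)
        match best with
        | none => some (key, td.1)
        | some b =>
          if key.1 < b.1.1 ∨ (key.1 = b.1.1 ∧ key.2 < b.1.2) then some (key, td.1) else some b
      | none => best) none
  match best with
  | some b => String.ofList b.2
  | none => "(None)"

-- ===== PRECONDITION & SPEC =====

-- a song A processes without raising: exactly four comma-separated fields, the four
-- int(...) slices of the two times parse, and the code contains at least one non-'#' char
def songOkL (song : List Char) : Bool :=
  match PySem.Chars.splitOn song [','] with
  | [start, endt, _, code] =>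
    (PySem.Int.ofChars? (start.take 2)).isSome && (PySem.Int.ofChars? (start.drop 3)).isSome &&
    (PySem.Int.ofChars? (endt.take 2)).isSome && (PySem.Int.ofChars? (endt.drop 3)).isSome &&
    decide (PySem.Chars.count code ['#'] < code.length)
  | _ => false

-- Pre_ excludes malformed songs (not exactly four comma-separated fields, unparseable time slices,
-- a code with no notes), on which A raises ValueError/ZeroDivisionError, and the empty melody m,
-- a degenerate input on which A (and the natural B) can loop forever when a played code starts with '#'.
def Pre_solution (m : String) (musicinfos : List String) : Prop :=
  m ≠ "" ∧ ∀ song ∈ musicinfos, songOkL song.toList = true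
instance (m : String) (musicinfos : List String) : Decidable (Pre_solution m musicinfos) := by
  unfold Pre_solution; infer_instance

def pvWitness_solution : String × List String :=
  ("ABCDEF", ["12:00,12:14,HELLO,C#DEF", "13:00,13:05,WORLD,ABCDEF"])

def Spec_solution (m : String) (musicinfos : List String) (out : String) : Prop := out = solution_alt m musicinfos
instance (m : String) (musicinfos : List String) (out : String) : Decidable (Spec_solution m musicinfos out) := by
  unfold Spec_solution; infer_instance

-- ===== CLAIM (what is proved, stated in full; the proofs are below) =====
def Claim_equal_solution : Prop := ∀ (m : String) (musicinfos : List String), Dom_solution m musicinfos → Pre_solution m musicinfos → Spec_solution m musicinfos (solution m musicinfos)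

-- ===== LEMMAS AND PROOFS =====

-- Chars.count with a single-character needle is List.count
theorem count_go_singleton (c : Char) : ∀ (l : List Char) (fuel acc : Nat), l.length ≤ fuel →
    PySem.Chars.count.go [c] fuel l acc = acc + l.count c := by
  intro l
  induction l with
  | nil => intro fuel acc _; cases fuel <;> simp [PySem.Chars.count.go]
  | cons h t ih =>
    intro fuel acc hf
    cases fuel with
    | zero => simp at hf
    | succ fuel =>
      by_cases hc : h = c
      · subst hc
        simp only [PySem.Chars.count.go, List.isPrefixOf, BEq.rfl, Bool.true_and, if_true, List.length_cons, List.length_nil,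
          List.drop_succ_cons, List.drop_zero]
        rw [ih fuel (acc + 1) (by simpa using hf)]
        simp [List.count_cons]
        omega
      · have hb : ([c].isPrefixOf (h :: t)) = false := by
          simp [List.isPrefixOf]
          exact fun hco => absurd (hco.symm) hc
        simp only [PySem.Chars.count.go, hb]
        rw [ih fuel acc (by simpa using hf)]
        simp [List.count_cons, hc]

theorem chars_count_singleton (c : Char) (l : List Char) :
    PySem.Chars.count l [c] = l.count c := by
  unfold PySem.Chars.count
  simp [count_go_singleton c l l.length 0 le_rfl]

-- bCut never moves left
theorem bCut_ge (code : List Char) : ∀ r i, i ≤ bCut code r i := by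
  intro r
  induction r with
  | zero => intro i; simp [bCut]
  | succ r ih =>
    intro i
    simp only [bCut]
    split
    · exact le_trans (by omega) (ih (i + 2))
    · exact le_trans (by omega) (ih (i + 1))

-- A's note-appending loop is "append the next bCut-many chars"
theorem partial_eq (code : List Char) : ∀ (r i : Nat) (acc : List Char),
    r + (code.drop i).count '#' < (code.drop i).length →
    aPartial code r i acc = acc ++ (code.take (bCut code r i)).drop i := by
  intro r
  induction r with
  | zero =>
    intro i acc _
    simp [aPartial, bCut]
  | succ r ih =>
    intro i acc h
    have hil : i < code.length := by
      by_contra hge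
      rw [List.drop_eq_nil_of_le (by omega)] at h
      simp at h
    have hi1 : i + 1 < code.length := by
      by_contra hge
      have hone : code.drop i = [code[i]] := by
        rw [List.drop_eq_getElem_cons hil]
        rw [List.drop_eq_nil_of_le (by omega)]
      rw [hone] at h
      simp at h
    have hdi : code.drop i = code[i] :: code[i+1] :: code.drop (i + 2) := by
      rw [List.drop_eq_getElem_cons hil, List.drop_eq_getElem_cons hi1]
    have hlen2 : (code.drop i).length = (code.drop (i+2)).length + 2 := by rw [hdi]; simp; omega
    have hlen1 : (code.drop i).length = (code.drop (i+1)).length + 1 := by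
      rw [List.drop_eq_getElem_cons hil]; simp; omega
    simp only [aPartial, List.getElem?_eq_getElem hil, List.getElem?_eq_getElem hi1]
    by_cases hsharp : code[i+1] = '#'
    · rw [if_pos hsharp]
      have hcle : (code.drop (i+2)).count '#' + 1 ≤ (code.drop i).count '#' := by
        rw [hdi, List.count_cons, List.count_cons]
        simp [hsharp]
      have hcnt : r + (code.drop (i + 2)).count '#' < (code.drop (i + 2)).length := by omega
      rw [ih (i + 2) _ hcnt]
      have hbc : bCut code (r + 1) i = bCut code r (i + 2) := by
        simp only [bCut]
        rw [if_pos ⟨hi1, by simp [List.getElem?_eq_getElem hi1, hsharp]⟩]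
      rw [hbc]
      have hK := bCut_ge code r (i + 2)
      set K := bCut code r (i + 2) with hKdef
      have h1 : (code.take K).drop i = code[i] :: code[i+1] :: (code.take K).drop (i + 2) := by
        rw [List.drop_take, List.drop_take, hdi,
          show K - i = (K - (i + 2)) + 1 + 1 by omega]
        rw [List.take_succ_cons, List.take_succ_cons]
      rw [h1, hsharp]
      simp
    · rw [if_neg hsharp]
      have hcle : (code.drop (i+1)).count '#' ≤ (code.drop i).count '#' := by
        rw [List.drop_eq_getElem_cons hil, List.count_cons]
        omega
      have hcnt : r + (code.drop (i + 1)).count '#' < (code.drop (i + 1)).length := by omega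
      rw [ih (i + 1) _ hcnt]
      have hbc : bCut code (r + 1) i = bCut code r (i + 1) := by
        simp only [bCut]
        rw [if_neg]
        rintro ⟨-, hx⟩
        rw [List.getElem?_eq_getElem hi1] at hx
        exact hsharp (by simpa using hx)
      rw [hbc]
      have hK := bCut_ge code r (i + 1)
      set K := bCut code r (i + 1) with hKdef
      have h1 : (code.take K).drop i = code[i] :: (code.take K).drop (i + 1) := by
        rw [List.drop_take, List.drop_take, List.drop_eq_getElem_cons hil,
          show K - i = (K - (i + 1)) + 1 by omega]
        rw [List.take_succ_cons]
      rw [h1]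
      simp

-- A's suffix-chopping melody chain = B's find-from-position scan
theorem chain_eq (mm : List Char) (hmm : mm ≠ []) (s : List Char) :
    ∀ (fa : Nat) (fb pos : Nat), pos ≤ s.length → s.length - pos < fa → s.length - pos < fb →
    aChain mm fa (s.drop pos) = bMatches mm s pos fb := by
  have hml : 1 ≤ mm.length := by
    cases mm with
    | nil => exact absurd rfl hmm
    | cons a t => simp
  intro fa
  induction fa with
  | zero => intro fb pos _ h _; omega
  | succ fa ih =>
    intro fb pos hpos hfa hfb
    cases fb with
    | zero => omega
    | succ fb =>
      have hff := PySem.Chars.findFrom_natCast s mm pos hpos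
      simp only [aChain, bMatches, hff]
      by_cases hin : PySem.Chars.isIn mm (s.drop pos) = true
      · rw [if_pos hin]
        have hfind : 0 ≤ PySem.Chars.find (s.drop pos) mm :=
          (PySem.Chars.find_nonneg_iff _ _).mpr ((PySem.Chars.isIn_iff_infix _ _).mp hin)
        have hne : ¬ (PySem.Chars.find (s.drop pos) mm = -1) := by omega
        rw [if_neg hne]
        have hne2 : ¬ ((pos : Int) + PySem.Chars.find (s.drop pos) mm = -1) := by omega
        rw [if_neg hne2]
        set idx := (PySem.Chars.find (s.drop pos) mm).toNat with hidx
        have hidxc : ((pos : Int) + PySem.Chars.find (s.drop pos) mm).toNat = pos + idx := by omega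
        rw [hidxc]
        have hpre := (PySem.Chars.find_spec hfind).1
        have hlen : idx + mm.length ≤ s.length - pos := by
          have h1 := hpre.length_le
          simp at h1
          omega
        have hcond : ((idx : Int) + mm.length ≤ ((s.drop pos).length : Int) - 1 ∧
              (s.drop pos)[idx + mm.length]? = some '#')
            ↔ (pos + idx + mm.length < s.length ∧ s[pos + idx + mm.length]? = some '#') := by
          rw [List.getElem?_drop]
          constructor
          · rintro ⟨h1, h2⟩
            simp at h1
            exact ⟨by omega, by rwa [show pos + (idx + mm.length) = pos + idx + mm.length by omega] at h2⟩
          · rintro ⟨h1, h2⟩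
            refine ⟨by simp; omega, ?_⟩
            rwa [show pos + (idx + mm.length) = pos + idx + mm.length by omega]
        by_cases hc : pos + idx + mm.length < s.length ∧ s[pos + idx + mm.length]? = some '#'
        · rw [if_pos (hcond.mpr hc), if_pos hc]
          rw [List.drop_drop]
          rw [show pos + (idx + mm.length) = pos + idx + mm.length by omega]
          exact ih fb (pos + idx + mm.length) (by omega) (by omega) (by omega)
        · rw [if_neg (fun hx => hc (hcond.mp hx)), if_neg hc]
      · rw [if_neg hin]
        have hm1 : PySem.Chars.findFrom s mm pos = -1 :=
          (PySem.Chars.findFrom_natCast_eq_neg_one_iff s mm pos hpos).mpr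
            (fun hinf => hin ((PySem.Chars.isIn_iff_infix _ _).mpr hinf))
        rw [hff] at hm1
        rw [if_pos hm1]

-- the per-song list A builds, expressed through B's bSong
def Lspec (m : List Char) : List (List Char) → Int → List (List Char × Int × Int)
  | [], _ => []
  | s :: rest, o =>
    (match bSong m s with | some td => [(td.1, td.2, o)] | none => []) ++ Lspec m rest (o + 1)

theorem aProcess_eq (m : List Char) (hm : m ≠ []) : ∀ (songs : List (List Char)) (o : Int) acc,
    (∀ s ∈ songs, songOkL s = true) →
    aProcess m songs o acc = acc ++ Lspec m songs o := by
  intro songs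
  induction songs with
  | nil => intro o acc _; simp [aProcess, Lspec]
  | cons song rest ih =>
    intro o acc hok
    have hsok := hok song (by simp)
    have hrest : ∀ s ∈ rest, songOkL s = true := fun s hs => hok s (by simp [hs])
    simp only [aProcess, Lspec]
    unfold songOkL at hsok
    cases hsp : PySem.Chars.splitOn song [','] with
    | nil => rw [hsp] at hsok; simp at hsok
    | cons f1 t1 =>
      cases t1 with
      | nil => rw [hsp] at hsok; simp at hsok
      | cons f2 t2 =>
        cases t2 with
        | nil => rw [hsp] at hsok; simp at hsok
        | cons f3 t3 =>
          cases t3 with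
          | nil => rw [hsp] at hsok; simp at hsok
          | cons f4 t4 =>
            cases t4 with
            | cons f5 t5 => rw [hsp] at hsok; simp at hsok
            | nil =>
              rw [hsp] at hsok
              simp only [] at hsok
              unfold bSong
              rw [hsp]
              obtain ⟨⟨⟨⟨h1, h2⟩, h3⟩, h4⟩, hcnt⟩ := by
                simpa [Bool.and_eq_true] using hsok
              obtain ⟨s1, hs1⟩ := Option.isSome_iff_exists.mp h1
              obtain ⟨s2, hs2⟩ := Option.isSome_iff_exists.mp h2
              obtain ⟨e1, he1⟩ := Option.isSome_iff_exists.mp h3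
              obtain ⟨e2, he2⟩ := Option.isSome_iff_exists.mp h4
              simp only [hs1, hs2, he1, he2]
              have hcount : PySem.Chars.count f4 ['#'] ≤ f4.length :=
                le_of_lt hcnt
              have hclpos : (0 : Int) < (f4.length : Int) - (PySem.Chars.count f4 ['#'] : Int) := by
                have := hcnt; omega
              set cl : Int := (f4.length : Int) - (PySem.Chars.count f4 ['#'] : Int) with hcl
              have hclne : ¬ (cl = 0) := by omega
              rw [if_neg hclne, if_neg hclne]
              have hdur : e2 + (e1 - s1) * 60 - s2 = (e1 - s1) * 60 + e2 - s2 := by ring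
              rw [hdur]
              set dur : Int := (e1 - s1) * 60 + e2 - s2 with hdurdef
              have hr0 : (0 : Int) ≤ PySem.Int.mod dur cl := PySem.Int.mod_nonneg dur hclpos
              have hrlt : PySem.Int.mod dur cl < cl := PySem.Int.mod_lt dur hclpos
              have hfc : aPartial f4 (PySem.Int.mod dur cl).toNat 0 (PySem.List.pyRepeat f4 (PySem.Int.floordiv dur cl))
                  = PySem.List.pyRepeat f4 (PySem.Int.floordiv dur cl) ++ f4.take (bCut f4 (PySem.Int.mod dur cl).toNat 0) := by
                rw [partial_eq]
                · simp
                · have hcc : (f4.drop 0).count '#' = PySem.Chars.count f4 ['#'] := by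
                    simp [chars_count_singleton]
                  rw [hcc]
                  simp only [List.drop_zero]
                  omega
              rw [hfc]
              set played := PySem.List.pyRepeat f4 (PySem.Int.floordiv dur cl) ++ f4.take (bCut f4 (PySem.Int.mod dur cl).toNat 0) with hpl
              have hchain : aChain m (played.length + 1) played = bMatches m played 0 (played.length + 1) := by
                have := chain_eq m hm played (played.length + 1) (played.length + 1) 0 (by omega) (by omega) (by omega)
                simpa using this
              rw [hchain]
              by_cases hb : bMatches m played 0 (played.length + 1) = true
              · rw [if_pos hb, if_pos hb]
                rw [ih (o + 1) _ hrest]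
                simp
              · rw [if_neg hb, if_neg hb]
                rw [ih (o + 1) _ hrest]
                simp

-- the selection step B performs, as a standalone function
def selStep (b : Option ((Int × Int) × List Char)) (x : List Char × Int × Int) : Option ((Int × Int) × List Char) :=
  match b with
  | none => some ((-x.2.1, x.2.2), x.1)
  | some bb =>
    if -x.2.1 < bb.1.1 ∨ (-x.2.1 = bb.1.1 ∧ x.2.2 < bb.1.2) then some ((-x.2.1, x.2.2), x.1) else some bb

theorem bFold_eq (m : List Char) : ∀ (songs : List (List Char)) (o : Int) (b : Option ((Int × Int) × List Char)),
    (PySem.List.enumerate songs o).foldl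
      (fun best oc =>
        match bSong m oc.2 with
        | some td =>
          let key : Int × Int := (-td.2, oc.1)
          match best with
          | none => some (key, td.1)
          | some bb =>
            if key.1 < bb.1.1 ∨ (key.1 = bb.1.1 ∧ key.2 < bb.1.2) then some (key, td.1) else some bb
        | none => best) b
    = (Lspec m songs o).foldl selStep b := by
  intro songs
  induction songs with
  | nil => intro o b; simp [PySem.List.enumerate_nil, Lspec]
  | cons s rest ih =>
    intro o b
    rw [PySem.List.enumerate_cons]
    simp only [List.foldl_cons, Lspec, List.foldl_append]
    rw [ih (o + 1)]
    congr 1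
    cases hbs : bSong m s with
    | none => simp
    | some td => cases b <;> simp [selStep]

-- first-max selection: head of the stable descending sort = running lexicographic minimum,
-- provided the order components are strictly increasing
theorem sel_eq (L : List (List Char × Int × Int))
    (hp : List.Pairwise (fun a b => a.2.2 < b.2.2) L) :
    (match PySem.List.sorted L (fun x => x.2.1) true with
      | [] => L.foldl selStep none = none
      | h :: _ => L.foldl selStep none = some ((-h.2.1, h.2.2), h.1) : Prop) := by
  induction L using List.reverseRecOn with
  | nil => simp [PySem.List.sorted]
  | append_singleton L x ih =>
    have hpL : List.Pairwise (fun a b => a.2.2 < b.2.2) L := (List.pairwise_append.mp hp).1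
    have hlt : ∀ y ∈ L, y.2.2 < x.2.2 := by
      intro y hy
      exact (List.pairwise_append.mp hp).2.2 y hy x (by simp)
    have hins : PySem.List.sorted (L ++ [x]) (fun v => v.2.1) true
        = PySem.List.insertBy (fun a b => decide (b.2.1 < a.2.1)) x (PySem.List.sorted L (fun v => v.2.1) true) := by
      rw [PySem.List.sorted_rev_eq_foldl_insertBy, PySem.List.sorted_rev_eq_foldl_insertBy]
      simp
    rw [List.foldl_append]
    specialize ih hpL
    cases hs : PySem.List.sorted L (fun v => v.2.1) true with
    | nil =>
      have hL : L = [] := by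
        have := PySem.List.sorted_eq_nil_iff (xs := L) (key := fun v => v.2.1) (rev := true)
        exact this.mp hs
      subst hL
      rw [hins, hs]
      simp [PySem.List.insertBy, selStep]
    | cons h t =>
      rw [hs] at ih
      simp only [List.foldl_cons, List.foldl_nil]
      rw [ih]
      have hmem : h ∈ L := by
        have hperm := PySem.List.sorted_perm L (fun v => v.2.1) true
        rw [hs] at hperm
        exact hperm.mem_iff.mp (by simp)
      have hho : h.2.2 < x.2.2 := hlt h hmem
      rw [hins, hs]
      simp only [PySem.List.insertBy]
      by_cases hgt : h.2.1 < x.2.1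
      · rw [if_pos (by simpa using hgt)]
        simp only [selStep]
        rw [if_pos (Or.inl (by omega))]
      · rw [if_neg (by simpa using hgt)]
        simp only [selStep]
        rw [if_neg]
        rintro (hlt1 | ⟨heq, hlt2⟩)
        · omega
        · omega

-- Lspec's order components are strictly increasing
theorem Lspec_orders (m : List Char) : ∀ (songs : List (List Char)) (o : Int),
    (∀ y ∈ Lspec m songs o, o ≤ y.2.2) ∧ List.Pairwise (fun a b => a.2.2 < b.2.2) (Lspec m songs o) := by
  intro songs
  induction songs with
  | nil => intro o; simp [Lspec]
  | cons s rest ih =>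
    intro o
    obtain ⟨hle, hpw⟩ := ih (o + 1)
    constructor
    · intro y hy
      simp only [Lspec, List.mem_append] at hy
      rcases hy with hy | hy
      · cases hbs : bSong m s with
        | none => rw [hbs] at hy; simp at hy
        | some td => rw [hbs] at hy; simp at hy; rw [hy]
      · have := hle y hy
        omega
    · simp only [Lspec]
      rw [List.pairwise_append]
      refine ⟨?_, hpw, ?_⟩
      · cases hbs : bSong m s <;> simp
      · intro a ha b hb
        cases hbs : bSong m s with
        | none => rw [hbs] at ha; simp at ha
        | some td =>
          rw [hbs] at ha; simp at ha
          have := hle b hb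
          rw [ha]
          simp
          omega

theorem toList_ne_nil_of_ne_empty {m : String} (h : m ≠ "") : m.toList ≠ [] := by
  intro hnil
  apply h
  have : m.toList = ("" : String).toList := by simpa using hnil
  exact String.toList_inj.mp (by simpa using this)

-- ===== VERDICT (by name: the statement is the Claim_ definition above) =====
theorem solution_spec : Claim_equal_solution := by
  intro m musicinfos _hdom hpre
  obtain ⟨hm, hok⟩ := hpre
  unfold Spec_solution solution solution_alt
  have hmL : m.toList ≠ [] := toList_ne_nil_of_ne_empty hm
  have hokL : ∀ s ∈ musicinfos.map String.toList, songOkL s = true := by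
    intro s hs
    obtain ⟨t, ht, rfl⟩ := List.mem_map.mp hs
    exact hok t ht
  rw [aProcess_eq m.toList hmL (musicinfos.map String.toList) 1 [] hokL]
  rw [bFold_eq m.toList (musicinfos.map String.toList) 1 none]
  simp only [List.nil_append]
  set L := Lspec m.toList (musicinfos.map String.toList) 1 with hL
  obtain ⟨-, hpw⟩ := Lspec_orders m.toList (musicinfos.map String.toList) 1
  rw [← hL] at hpw
  have hsel := sel_eq L hpw
  cases hLc : L with
  | nil =>
    simp
  | cons a t =>
    cases t with
    | nil =>
      simp [selStep]
    | cons b t2 =>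
      rw [hLc] at hsel
      have hsort1 : PySem.List.sorted (a :: b :: t2) (fun x => x.2.2) = a :: b :: t2 := by
        apply PySem.List.sorted_eq_self_of_pairwise
        rw [hLc] at hpw
        exact hpw.imp (fun h => le_of_lt h)
      cases hs2 : PySem.List.sorted (a :: b :: t2) (fun x : List Char × Int × Int => x.2.1) true with
      | nil =>
        exact absurd ((PySem.List.sorted_eq_nil_iff _ _ _).mp hs2) (by simp)
      | cons y ys =>
        rw [hs2] at hsel
        simp only [] at hsel
        rw [hsel, hsort1, hs2]
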